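-- pv_equiv track=rewrite | github.com/Blaxav/Challenges-algo | AOC2021/Antoine/13.py | part1
-- ===== SOURCE A (Python) =====
-- def part1(coordinates: list, instructions: list, limit: int):
--     positions_dict = {k:v for k, v in enumerate(coordinates)}
--     for instruction in instructions[:limit]:
--         for k, v in positions_dict.items():
--             if instruction[0] == 'x' and v[0] > instruction[1]:
--                 positions_dict[k] = (instruction[1] * 2 - v[0], v[1])
--             if instruction[0] == 'y' and v[1] > instruction[1]:
--                 positions_dict[k] = (v[0], instruction[1] * 2 - v[1])
--
--     return positions_dict
-- ===== SOURCE B (Python) =====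
-- def part1(coordinates: list, instructions: list, limit: int):
--     # x-folds and y-folds act on independent components, so they commute:
--     # split the instructions once per axis and reduce each scalar coordinate
--     # through its own list of fold values.
--     active = instructions[:limit]
--     xfolds = [val for axis, val in active if axis == 'x']
--     yfolds = [val for axis, val in active if axis == 'y']
--
--     def fold1(folds, c):
--         for f in folds:
--             if c > f:
--                 c = 2 * f - c
--         return c
--
--     return {i: (fold1(xfolds, x), fold1(yfolds, y))
--             for i, (x, y) in enumerate(coordinates)}
-- ===== Notes on version B (the rewrite author's own statement) =====
-- stated objective: faster
-- what changed: B exploits that x-folds and y-folds act on independent coordinate components and commute: it splits the instruction list once into two per-axis lists of fold values and maps each point to a pair of scalar 1-D fold reductions, instead of A's repeated in-place rewriting of a shared index->point dict once per instruction.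
import Mathlib
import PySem

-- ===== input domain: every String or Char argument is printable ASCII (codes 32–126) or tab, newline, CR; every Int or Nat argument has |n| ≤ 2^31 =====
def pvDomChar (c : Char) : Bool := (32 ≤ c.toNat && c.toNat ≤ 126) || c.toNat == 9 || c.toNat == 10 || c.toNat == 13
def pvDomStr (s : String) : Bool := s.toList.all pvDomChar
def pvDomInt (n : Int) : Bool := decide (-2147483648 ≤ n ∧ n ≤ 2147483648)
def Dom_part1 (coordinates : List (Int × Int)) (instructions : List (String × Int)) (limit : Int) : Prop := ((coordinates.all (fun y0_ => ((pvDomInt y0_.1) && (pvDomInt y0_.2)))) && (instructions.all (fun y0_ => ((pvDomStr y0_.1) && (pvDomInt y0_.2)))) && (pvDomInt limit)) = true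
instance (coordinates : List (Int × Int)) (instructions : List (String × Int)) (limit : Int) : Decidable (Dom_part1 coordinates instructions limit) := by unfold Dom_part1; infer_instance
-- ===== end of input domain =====

-- B splits the instructions into per-axis fold-value lists (x- and y-folds commute, acting on
-- independent components) and reduces each scalar coordinate separately; A rewrites a shared dict per fold.
-- ===== PORT A =====
-- Python A mutates positions_dict while iterating items(); only existing keys are
-- overwritten, so the iteration sequence is the items snapshot taken at loop entry,
-- and each entry's v is its pre-pass value (each key is visited exactly once).
def part1 (coordinates : List (Int × Int)) (instructions : List (String × Int)) (limit : Int) : List (Int × Int × Int) :=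
  let d0 : PySem.Dict Int (Int × Int) :=
    (PySem.List.enumerate coordinates).foldl (fun d kv => d.insert kv.1 kv.2) PySem.Dict.empty
  let d :=
    (PySem.List.slice instructions none (some limit)).foldl
      (fun d ins =>
        d.items.foldl
          (fun acc kv =>
            let acc := if ins.1 = "x" ∧ kv.2.1 > ins.2 then acc.insert kv.1 (ins.2 * 2 - kv.2.1, kv.2.2) else acc
            if ins.1 = "y" ∧ kv.2.2 > ins.2 then acc.insert kv.1 (kv.2.1, ins.2 * 2 - kv.2.2) else acc)
          d)
      d0
  d.items

-- ===== PORT B =====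
-- 1-D fold reduction of a single scalar coordinate through a list of fold values.
def fold1 (folds : List Int) (c : Int) : Int :=
  folds.foldl (fun c f => if c > f then 2 * f - c else c) c

def part1_alt (coordinates : List (Int × Int)) (instructions : List (String × Int)) (limit : Int) : List (Int × Int × Int) :=
  let active := PySem.List.slice instructions none (some limit)
  let xfolds := (active.filter (fun p => p.1 == "x")).map (·.2)
  let yfolds := (active.filter (fun p => p.1 == "y")).map (·.2)
  (PySem.List.enumerate coordinates).map (fun kv => (kv.1, fold1 xfolds kv.2.1, fold1 yfolds kv.2.2))

-- ===== PRECONDITION & SPEC =====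
def Spec_part1 (coordinates : List (Int × Int)) (instructions : List (String × Int)) (limit : Int) (out : List (Int × Int × Int)) : Prop := out = part1_alt coordinates instructions limit
instance (coordinates : List (Int × Int)) (instructions : List (String × Int)) (limit : Int) (out : List (Int × Int × Int)) : Decidable (Spec_part1 coordinates instructions limit out) := by unfold Spec_part1; infer_instance

-- ===== CLAIM (what is proved, stated in full; the proofs are below) =====
def Claim_equal_part1 : Prop := ∀ (coordinates : List (Int × Int)) (instructions : List (String × Int)) (limit : Int), Dom_part1 coordinates instructions limit → Spec_part1 coordinates instructions limit (part1 coordinates instructions limit)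

-- ===== LEMMAS AND PROOFS =====

-- A's per-instruction update of a single point.
def bstep (ins : String × Int) (v : Int × Int) : Int × Int :=
  if ins.1 = "x" ∧ v.1 > ins.2 then (2 * ins.2 - v.1, v.2)
  else if ins.1 = "y" ∧ v.2 > ins.2 then (v.1, 2 * ins.2 - v.2)
  else v

-- Folding one point through every instruction in order (proof-side view of A's work per point).
def foldAll (folds : List (String × Int)) (v : Int × Int) : Int × Int :=
  folds.foldl (fun v ins => bstep ins v) v

-- A's inner pass over one instruction, as a function of the dict.
def astep (ins : String × Int) (d : PySem.Dict Int (Int × Int)) : PySem.Dict Int (Int × Int) :=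
  d.items.foldl
    (fun acc kv =>
      let acc := if ins.1 = "x" ∧ kv.2.1 > ins.2 then acc.insert kv.1 (ins.2 * 2 - kv.2.1, kv.2.2) else acc
      if ins.1 = "y" ∧ kv.2.2 > ins.2 then acc.insert kv.1 (kv.2.1, ins.2 * 2 - kv.2.2) else acc)
    d

lemma astep_aux (ins : String × Int) :
    ∀ (post pre : List (Int × (Int × Int))),
      ((pre ++ post).map (·.1)).Nodup →
      (post.foldl
        (fun acc kv =>
          let acc := if ins.1 = "x" ∧ kv.2.1 > ins.2 then acc.insert kv.1 (ins.2 * 2 - kv.2.1, kv.2.2) else acc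
          if ins.1 = "y" ∧ kv.2.2 > ins.2 then acc.insert kv.1 (kv.2.1, ins.2 * 2 - kv.2.2) else acc)
        (PySem.Dict.mk (pre.map (fun q => (q.1, bstep ins q.2)) ++ post))).items
      = (pre ++ post).map (fun q => (q.1, bstep ins q.2)) := by
  intro post
  induction post with
  | nil => intro pre h; simp
  | cons kv rest ih =>
    intro pre h
    obtain ⟨k, v⟩ := kv
    have hk : k ∉ (pre.map (·.1)) ∧ k ∉ (rest.map (·.1)) := by
      have h' := h
      simp only [List.map_append, List.map_cons, List.nodup_append, List.nodup_cons] at h'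
      exact ⟨fun hm => (h'.2.2 k hm k (by simp)) rfl, h'.2.1.1⟩
    have hins : ∀ (w : Int × Int),
        ((PySem.Dict.mk (pre.map (fun q => (q.1, bstep ins q.2)) ++ (k, v) :: rest)).insert k w)
        = PySem.Dict.mk (pre.map (fun q => (q.1, bstep ins q.2)) ++ (k, w) :: rest) := by
      intro w
      apply PySem.Dict.ext
      rw [PySem.Dict.items_insert_of_contains]
      · show (pre.map (fun q => (q.1, bstep ins q.2)) ++ (k, v) :: rest).map _ = _
        rw [List.map_append]
        congr 1
        · rw [List.map_map]
          apply List.map_congr_left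
          intro p hp
          have hne : p.1 ≠ k := fun he => hk.1 (List.mem_map.mpr ⟨p, hp, he⟩)
          simp [Function.comp, hne]
        · simp only [List.map_cons, beq_self_eq_true, if_pos]
          congr 1
          rw [List.map_congr_left (g := id) (fun q hq => by
            have hne : q.1 ≠ k := fun he => hk.2 (List.mem_map.mpr ⟨q, hq, he⟩)
            simp [hne]), List.map_id]
      · show PySem.Dict.contains _ _ = true
        simp [PySem.Dict.contains]
    have hbody :
        (let acc := if ins.1 = "x" ∧ v.1 > ins.2 then (PySem.Dict.mk (pre.map (fun q => (q.1, bstep ins q.2)) ++ (k, v) :: rest)).insert k (ins.2 * 2 - v.1, v.2) else (PySem.Dict.mk (pre.map (fun q => (q.1, bstep ins q.2)) ++ (k, v) :: rest));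
         if ins.1 = "y" ∧ v.2 > ins.2 then acc.insert k (v.1, ins.2 * 2 - v.2) else acc)
        = PySem.Dict.mk ((pre ++ [(k, v)]).map (fun q => (q.1, bstep ins q.2)) ++ rest) := by
      by_cases c1 : ins.1 = "x" ∧ v.1 > ins.2
      · have hb : bstep ins v = (ins.2 * 2 - v.1, v.2) := by
          simp [bstep, c1, Int.mul_comm]
        simp [c1.1, c1.2, hins, hb]
      · by_cases c2 : ins.1 = "y" ∧ v.2 > ins.2
        · have hb : bstep ins v = (v.1, ins.2 * 2 - v.2) := by
            simp [bstep, c2, Int.mul_comm]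
          simp [c2.1, c2.2, hins, hb]
        · have hb : bstep ins v = v := by simp [bstep, c1, c2]
          simp [c1, c2, hb]
    simp only [List.foldl_cons]
    rw [hbody, ih (pre ++ [(k, v)]) (by simpa using h)]
    simp

lemma items_astep (ins : String × Int) (d : PySem.Dict Int (Int × Int))
    (h : d.keys.Nodup) :
    (astep ins d).items = d.items.map (fun q => (q.1, bstep ins q.2)) := by
  have h' := astep_aux ins d.items [] (by simpa [PySem.Dict.keys] using h)
  simpa [astep] using h'

lemma keys_astep (ins : String × Int) (d : PySem.Dict Int (Int × Int))
    (h : d.keys.Nodup) : (astep ins d).keys = d.keys := by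
  show (astep ins d).items.map (·.1) = d.items.map (·.1)
  rw [items_astep ins d h]
  simp

lemma items_foldl_astep (folds : List (String × Int)) :
    ∀ (d : PySem.Dict Int (Int × Int)), d.keys.Nodup →
      (folds.foldl (fun d ins => astep ins d) d).items
        = d.items.map (fun q => (q.1, foldAll folds q.2)) := by
  induction folds with
  | nil => intro d _; simp [foldAll]
  | cons ins rest ih =>
    intro d h
    have hnd : (astep ins d).keys.Nodup := by rw [keys_astep ins d h]; exact h
    simp only [List.foldl_cons]
    rw [ih (astep ins d) hnd, items_astep ins d h, List.map_map]
    apply List.map_congr_left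
    intro q _
    simp [Function.comp, foldAll]

-- The commutation/splitting fact B relies on: folding one point through all instructions
-- in order equals folding each scalar coordinate through its own per-axis value list.
lemma foldAll_split (folds : List (String × Int)) :
    ∀ (v : Int × Int),
      foldAll folds v
        = (fold1 ((folds.filter (fun p => p.1 == "x")).map (·.2)) v.1,
           fold1 ((folds.filter (fun p => p.1 == "y")).map (·.2)) v.2) := by
  induction folds with
  | nil => intro v; simp [foldAll, fold1]
  | cons ins rest ih =>
    intro v
    have hstep : foldAll (ins :: rest) v = foldAll rest (bstep ins v) := by
      simp [foldAll]
    rw [hstep, ih (bstep ins v)]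
    by_cases c1 : ins.1 = "x"
    · have hb : bstep ins v = (if v.1 > ins.2 then 2 * ins.2 - v.1 else v.1, v.2) := by
        by_cases hgt : v.1 > ins.2 <;> simp [bstep, c1, hgt]
      simp [hb, c1, fold1]
    · by_cases c2 : ins.1 = "y"
      · have hb : bstep ins v = (v.1, if v.2 > ins.2 then 2 * ins.2 - v.2 else v.2) := by
          by_cases hgt : v.2 > ins.2 <;> simp [bstep, c2, hgt]
        simp [hb, c2, fold1]
      · have hb : bstep ins v = v := by simp [bstep, c1, c2]
        simp [hb, c1, c2]

-- ===== VERDICT (by name: the statement is the Claim_ definition above) =====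
theorem part1_spec : Claim_equal_part1 := by
  intro coordinates instructions limit _
  show part1 coordinates instructions limit = part1_alt coordinates instructions limit
  unfold part1 part1_alt
  have hfresh :
      ((PySem.List.enumerate coordinates).foldl (fun d kv => d.insert kv.1 kv.2)
        (PySem.Dict.empty : PySem.Dict Int (Int × Int))).items
        = PySem.List.enumerate coordinates := by
    have h := PySem.Dict.items_foldl_insert_fresh (PySem.List.enumerate coordinates)
      (fun kv => kv.1) (fun kv => kv.2) (PySem.Dict.empty : PySem.Dict Int (Int × Int))
      (by intro a _; simp) (by
        have hp := PySem.List.pairwise_lt_enumerate coordinates 0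
        exact List.pairwise_map.mpr (hp.imp (fun h => ne_of_lt h)))
    simpa using h
  have hnd :
      ((PySem.List.enumerate coordinates).foldl (fun d kv => d.insert kv.1 kv.2)
        (PySem.Dict.empty : PySem.Dict Int (Int × Int))).keys.Nodup :=
    PySem.Dict.nodup_keys_foldl_insert_key (PySem.List.enumerate coordinates)
      (fun kv => kv.1) _ _ (by simp)
  have hmain := items_foldl_astep (PySem.List.slice instructions none (some limit)) _ hnd
  simp only [astep] at hmain
  rw [hmain, hfresh]
  apply List.map_congr_left
  intro kv _
  rw [foldAll_split]
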